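-- pv_equiv track=rewrite | github.com/jalhackl/SPrime-mapping | sprime_mapping.py | split_archaic_fragments_from_segment
-- ===== SOURCE A (Python) =====
-- def split_archaic_fragments_from_segment(segment_snps, hap_hits):
--     """
--     Split a segment into fragments of contiguous archaic SNPs.
--
--     Parameters
--     ----------
--     segment_snps : list[int]
--         Sorted positions of all SNPs in the segment (archaic + non-archaic)
--     hap_hits : set[int]
--         Positions of SNPs in this haplotype that carry the archaic allele
--
--     Returns
--     -------
--     List of fragments: each fragment is a list of SNP positions
--     optional: List of all snps in fragments: each fragment is a list of SNP positions, including non-archaic snps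
--     """
--
--     fragments = []
--     current_frag = []
--     for pos in segment_snps:
--
--
--         if pos in hap_hits:
--             current_frag.append(pos)
--         else:
--             if current_frag:
--                 fragments.append(current_frag)
--                 current_frag = []
--
--
--     if current_frag:
--         fragments.append(current_frag)
--
--     return fragments
-- ===== SOURCE B (Python) =====
-- def split_archaic_fragments_from_segment(segment_snps, hap_hits):
--     """Run-scan decomposition: find each maximal archaic run by advancing a
--     second index, emit it as a slice, then jump past it."""
--     fragments = []
--     i, n = 0, len(segment_snps)
--     while i < n:
--         if segment_snps[i] in hap_hits:
--             j = i + 1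
--             while j < n and segment_snps[j] in hap_hits:
--                 j += 1
--             fragments.append(segment_snps[i:j])
--             i = j
--         else:
--             i += 1
--     return fragments
-- ===== Notes on version B (the rewrite author's own statement) =====
-- stated objective: alternative
-- what changed: Replaced A's accumulator-and-flush fold (append while archaic, flush on non-archaic and again after the loop) with a run-scan: advance a second index to the end of each maximal archaic run, emit the slice, and jump past it, so no trailing-flush special case exists.
import Mathlib
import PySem

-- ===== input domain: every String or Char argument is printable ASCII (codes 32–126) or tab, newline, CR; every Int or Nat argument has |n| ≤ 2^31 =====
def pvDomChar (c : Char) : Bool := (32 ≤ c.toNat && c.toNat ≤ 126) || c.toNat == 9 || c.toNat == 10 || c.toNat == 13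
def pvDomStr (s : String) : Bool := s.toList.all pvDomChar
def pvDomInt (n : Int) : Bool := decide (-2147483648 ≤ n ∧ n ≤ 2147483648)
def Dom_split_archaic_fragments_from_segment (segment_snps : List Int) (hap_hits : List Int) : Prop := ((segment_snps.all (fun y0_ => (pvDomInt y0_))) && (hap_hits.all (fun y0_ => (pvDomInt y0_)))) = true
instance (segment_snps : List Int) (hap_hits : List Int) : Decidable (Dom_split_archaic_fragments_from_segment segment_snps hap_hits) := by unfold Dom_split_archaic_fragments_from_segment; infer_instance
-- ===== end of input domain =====

-- B replaces A's accumulator-and-flush loop with a run-scan that emits each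
-- maximal archaic run directly (no trailing-flush case); objective: alternative.

-- ===== PORT A =====
-- accumulator loop: append while archaic, flush on non-archaic, final flush
def split_archaic_fragments_from_segment (segment_snps : List Int) (hap_hits : List Int) : List (List Int) :=
  let st := segment_snps.foldl
    (fun (st : List (List Int) × List Int) pos =>
      if pos ∈ hap_hits then (st.1, st.2 ++ [pos])
      else if st.2 ≠ [] then (st.1 ++ [st.2], ([] : List Int)) else st)
    ([], [])
  if st.2 ≠ [] then st.1 ++ [st.2] else st.1

-- ===== PORT B =====
-- run-scan: at an archaic position take the whole maximal archaic run
-- (inner while loop = takeWhile), emit it, and continue after it (dropWhile)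
def altRuns (hap_hits : List Int) : List Int → List (List Int)
  | [] => []
  | p :: rest =>
    if p ∈ hap_hits then
      (p :: rest.takeWhile (fun q => decide (q ∈ hap_hits))) ::
        altRuns hap_hits (rest.dropWhile (fun q => decide (q ∈ hap_hits)))
    else altRuns hap_hits rest
termination_by l => l.length
decreasing_by
  · exact Nat.lt_succ_of_le (rest.length_dropWhile_le _)
  · simp

def split_archaic_fragments_from_segment_alt (segment_snps : List Int) (hap_hits : List Int) : List (List Int) :=
  altRuns hap_hits segment_snps

-- ===== PRECONDITION & SPEC =====
def Spec_split_archaic_fragments_from_segment (segment_snps : List Int) (hap_hits : List Int) (out : List (List Int)) : Prop := out = split_archaic_fragments_from_segment_alt segment_snps hap_hits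
instance (segment_snps : List Int) (hap_hits : List Int) (out : List (List Int)) : Decidable (Spec_split_archaic_fragments_from_segment segment_snps hap_hits out) := by unfold Spec_split_archaic_fragments_from_segment; infer_instance

-- ===== CLAIM (what is proved, stated in full; the proofs are below) =====
def Claim_equal_split_archaic_fragments_from_segment : Prop := ∀ (segment_snps : List Int) (hap_hits : List Int), Dom_split_archaic_fragments_from_segment segment_snps hap_hits → Spec_split_archaic_fragments_from_segment segment_snps hap_hits (split_archaic_fragments_from_segment segment_snps hap_hits)

-- ===== LEMMAS AND PROOFS =====

def stepA (hh : List Int) (st : List (List Int) × List Int) (pos : Int) : List (List Int) × List Int :=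
  if pos ∈ hh then (st.1, st.2 ++ [pos])
  else if st.2 ≠ [] then (st.1 ++ [st.2], ([] : List Int)) else st

def finishA (st : List (List Int) × List Int) : List (List Int) :=
  if st.2 ≠ [] then st.1 ++ [st.2] else st.1

lemma portA_eq (ss hh : List Int) :
    split_archaic_fragments_from_segment ss hh = finishA (ss.foldl (stepA hh) ([], [])) := rfl

-- B's result when a run `cur` has already been collected
def mergeHead (hh cur : List Int) (ss : List Int) : List (List Int) :=
  let tw := ss.takeWhile (fun q => decide (q ∈ hh))
  if cur ++ tw = [] then altRuns hh ss
  else (cur ++ tw) :: altRuns hh (ss.dropWhile (fun q => decide (q ∈ hh)))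

lemma mergeHead_nil (hh ss : List Int) : mergeHead hh [] ss = altRuns hh ss := by
  cases ss with
  | nil => simp [mergeHead]
  | cons p rest =>
    by_cases h : p ∈ hh
    · rw [mergeHead]
      simp only [List.takeWhile_cons, List.dropWhile_cons, h, decide_true, if_true, List.nil_append]
      conv_rhs => rw [altRuns]
      rw [if_pos h]
      simp
    · rw [mergeHead]
      simp only [List.takeWhile_cons, List.dropWhile_cons, h, decide_false]
      simp

lemma loop_spec (hh : List Int) (ss : List Int) : ∀ (frags : List (List Int)) (cur : List Int),
    finishA (ss.foldl (stepA hh) (frags, cur)) = frags ++ mergeHead hh cur ss := by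
  induction ss with
  | nil =>
    intro frags cur
    by_cases hc : cur = [] <;> simp [finishA, mergeHead, hc, altRuns]
  | cons p rest ih =>
    intro frags cur
    rw [List.foldl_cons]
    by_cases h : p ∈ hh
    · rw [show stepA hh (frags, cur) p = (frags, cur ++ [p]) by rw [stepA, if_pos h]]
      rw [ih frags (cur ++ [p])]
      congr 1
      rw [mergeHead, mergeHead]
      simp only [List.takeWhile_cons, List.dropWhile_cons, h, decide_true, if_true]
      simp
    · by_cases hc : cur = []
      · subst hc
        rw [show stepA hh (frags, ([] : List Int)) p = (frags, []) by
          rw [stepA, if_neg h]; simp]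
        rw [ih frags [], mergeHead_nil, mergeHead_nil]
        conv_rhs => rw [altRuns]
        rw [if_neg h]
      · rw [show stepA hh (frags, cur) p = (frags ++ [cur], []) by
          rw [stepA, if_neg h]; simp [hc]]
        rw [ih (frags ++ [cur]) [], mergeHead_nil, mergeHead]
        simp only [List.takeWhile_cons, List.dropWhile_cons, h, decide_false]
        simp only [Bool.false_eq_true, if_false, List.append_nil, List.append_assoc,
          List.singleton_append, if_neg hc]
        congr 2
        conv_rhs => rw [altRuns]
        rw [if_neg h]

-- ===== VERDICT (by name: the statement is the Claim_ definition above) =====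
theorem split_archaic_fragments_from_segment_spec : Claim_equal_split_archaic_fragments_from_segment := by
  intro ss hh _
  show split_archaic_fragments_from_segment ss hh = split_archaic_fragments_from_segment_alt ss hh
  rw [portA_eq, loop_spec hh ss [] [], mergeHead_nil]
  rfl
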